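-- pv_equiv track=rewrite | github.com/ai-dg/dslr | pair_plot.py | ft_generating_all_pair_subjects
-- ===== SOURCE A (Python) =====
-- def ft_generating_all_pair_subjects(data):
--     headers = list(data.keys())
--
--     list_of_pairs = {}
--
--     for header in headers:
--         list_of_pairs[header] = []
--
--
--     for subjects in headers:
--         subject = subjects
--         for sub in headers:
--             if sub != subject:
--                 list_of_pairs[subject].append(sub)
--
--     return list_of_pairs
-- ===== SOURCE B (Python) =====
-- def ft_generating_all_pair_subjects(data):
--     headers = list(data.keys())
--     return {h: headers[:i] + headers[i + 1:] for i, h in enumerate(headers)}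
-- ===== Notes on version B (the rewrite author's own statement) =====
-- stated objective: idiomatic
-- what changed: Replaces the two explicit loops (dict pre-initialisation plus a nested scan with a != test appending one element at a time) by a single dict comprehension over enumerate that builds each value at once as the slice concatenation headers[:i] + headers[i+1:], positionally excluding the current key; the inner equality-test loop disappears.
import Mathlib
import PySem

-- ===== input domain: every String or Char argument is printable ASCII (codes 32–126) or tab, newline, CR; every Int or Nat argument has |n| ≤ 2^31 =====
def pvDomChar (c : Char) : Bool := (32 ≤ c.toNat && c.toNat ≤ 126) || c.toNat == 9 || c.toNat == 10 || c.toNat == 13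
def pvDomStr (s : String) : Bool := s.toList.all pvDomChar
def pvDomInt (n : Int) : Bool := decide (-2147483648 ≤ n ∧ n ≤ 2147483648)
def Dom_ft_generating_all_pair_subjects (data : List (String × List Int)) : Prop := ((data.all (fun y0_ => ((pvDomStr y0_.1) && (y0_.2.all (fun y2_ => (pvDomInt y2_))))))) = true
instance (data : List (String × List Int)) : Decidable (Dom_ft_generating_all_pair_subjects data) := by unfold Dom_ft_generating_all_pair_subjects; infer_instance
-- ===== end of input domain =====

-- B replaces A's nested loops (dict pre-init + inner != scan) by one pass over enumerate
-- building each value as the slice concatenation headers[:i] + headers[i+1:] (idiomatic rewrite).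


-- ===== PORT A =====
-- list_of_pairs[header] = []  (overwrite in place if the key exists, else append at the end)
def pvSetEmpty (d : List (String × List String)) (k : String) : List (String × List String) :=
  match d with
  | [] => [(k, [])]
  | p :: rest => if p.1 = k then (k, []) :: rest else p :: pvSetEmpty rest k

-- list_of_pairs[subject].append(sub)  (mutate the value of the matching key; every subject was inserted above)
def pvAppendAt (d : List (String × List String)) (k : String) (x : String) : List (String × List String) :=
  match d with
  | [] => []
  | p :: rest => if p.1 = k then (p.1, p.2 ++ [x]) :: rest else p :: pvAppendAt rest k x

def ft_generating_all_pair_subjects (data : List (String × List Int)) : List (String × List String) :=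
  let headers := data.map Prod.fst
  let d0 := headers.foldl (fun d header => pvSetEmpty d header) []
  headers.foldl (fun d subject =>
    headers.foldl (fun d sub => if sub ≠ subject then pvAppendAt d subject sub else d) d) d0

-- ===== PORT B =====
def ft_generating_all_pair_subjects_alt (data : List (String × List Int)) : List (String × List String) :=
  let headers := data.map Prod.fst
  (PySem.List.enumerate headers).map
    (fun p => (p.2, PySem.List.slice headers none (some p.1) ++ PySem.List.slice headers (some (p.1 + 1)) none))

-- ===== PRECONDITION & SPEC =====
-- Pre_ excludes association lists with duplicate keys: the argument is a Python dict, whose keys are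
-- necessarily distinct, so no actual call of A can present such an input.
def Pre_ft_generating_all_pair_subjects (data : List (String × List Int)) : Prop :=
  (data.map Prod.fst).Nodup
instance (data : List (String × List Int)) : Decidable (Pre_ft_generating_all_pair_subjects data) := by unfold Pre_ft_generating_all_pair_subjects; infer_instance

def pvWitness_ft_generating_all_pair_subjects : (List (String × List Int)) := [("a", [1]), ("b", []), ("c", [2, 3])]

def Spec_ft_generating_all_pair_subjects (data : List (String × List Int)) (out : List (String × List String)) : Prop := out = ft_generating_all_pair_subjects_alt data
instance (data : List (String × List Int)) (out : List (String × List String)) : Decidable (Spec_ft_generating_all_pair_subjects data out) := by unfold Spec_ft_generating_all_pair_subjects; infer_instance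

-- ===== CLAIM (what is proved, stated in full; the proofs are below) =====
def Claim_equal_ft_generating_all_pair_subjects : Prop := ∀ (data : List (String × List Int)), Dom_ft_generating_all_pair_subjects data → Pre_ft_generating_all_pair_subjects data → Spec_ft_generating_all_pair_subjects data (ft_generating_all_pair_subjects data)

-- ===== LEMMAS AND PROOFS =====

-- generic first-match value updater (proof-only helper)
def pvUpd (d : List (String × List String)) (k : String) (f : List String → List String) : List (String × List String) :=
  match d with
  | [] => []
  | p :: rest => if p.1 = k then (p.1, f p.2) :: rest else p :: pvUpd rest k f

theorem keys_pvUpd (d : List (String × List String)) (k : String) (f : List String → List String) :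
    (pvUpd d k f).map Prod.fst = d.map Prod.fst := by
  induction d with
  | nil => rfl
  | cons p rest ih => simp only [pvUpd]; split_ifs <;> simp [ih]

theorem pvUpd_pvUpd (d : List (String × List String)) (k : String) (f g : List String → List String) :
    pvUpd (pvUpd d k f) k g = pvUpd d k (fun v => g (f v)) := by
  induction d with
  | nil => rfl
  | cons p rest ih =>
      by_cases h : p.1 = k
      · simp [pvUpd, h]
      · simp [pvUpd, h, ih]

theorem pvAppendAt_eq_pvUpd (d : List (String × List String)) (k x : String) :
    pvAppendAt d k x = pvUpd d k (fun v => v ++ [x]) := by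
  induction d with
  | nil => rfl
  | cons p rest ih =>
      by_cases h : p.1 = k
      · simp [pvAppendAt, pvUpd, h]
      · simp [pvAppendAt, pvUpd, h, ih]

theorem pvUpd_id (d : List (String × List String)) (k : String) :
    pvUpd d k (fun v => v ++ []) = d := by
  induction d with
  | nil => rfl
  | cons p rest ih =>
      simp only [pvUpd]
      split_ifs with h
      · simp [← h]  -- (a.1, a.2) = a
      · rw [ih]

theorem foldl_pvAppendAt (xs : List String) (k : String) (d : List (String × List String)) :
    xs.foldl (fun d x => pvAppendAt d k x) d = pvUpd d k (fun v => v ++ xs) := by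
  have hf : (fun (d : List (String × List String)) (x : String) => pvAppendAt d k x)
      = fun d x => pvUpd d k (fun v => v ++ [x]) := by
    funext d x
    exact pvAppendAt_eq_pvUpd d k x
  rw [hf]
  induction xs generalizing d with
  | nil => exact (pvUpd_id d k).symm
  | cons x xs ih =>
      rw [List.foldl_cons, ih, pvUpd_pvUpd]
      congr 1
      funext v
      simp

-- inner loop of A: append every sub ≠ subject to key subject
theorem inner_loop_eq (headers : List String) (subject : String) (d : List (String × List String)) :
    headers.foldl (fun d sub => if sub ≠ subject then pvAppendAt d subject sub else d) d
      = pvUpd d subject (fun v => v ++ headers.filter (fun s => decide (s ≠ subject))) := by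
  rw [PySem.List.foldl_ite_eq_foldl_filter, foldl_pvAppendAt]

theorem pvUpd_eq_map (d : List (String × List String)) (k : String) (f : List String → List String)
    (hd : (d.map Prod.fst).Nodup) :
    pvUpd d k f = d.map (fun p => if p.1 = k then (p.1, f p.2) else p) := by
  induction d with
  | nil => rfl
  | cons p rest ih =>
      simp only [List.map_cons, List.nodup_cons] at hd
      by_cases h : p.1 = k
      · have hnot : k ∉ rest.map Prod.fst := h ▸ hd.1
        have hrest : rest.map (fun p => if p.1 = k then (p.1, f p.2) else p) = rest := by
          conv_rhs => rw [← List.map_id rest]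
          apply List.map_congr_left
          intro q hq
          have : q.1 ≠ k := fun e => hnot (e ▸ List.mem_map_of_mem hq)
          simp [this]
        simp [pvUpd, h, hrest]
      · simp [pvUpd, h, ih hd.2]

-- outer loop: fold pvUpd over a nodup key list applies g once to every key in it
theorem outer_loop_eq (ks : List String) (g : String → List String → List String)
    (d : List (String × List String)) (hks : ks.Nodup) (hd : (d.map Prod.fst).Nodup) :
    ks.foldl (fun d s => pvUpd d s (g s)) d
      = d.map (fun p => if p.1 ∈ ks then (p.1, g p.1 p.2) else p) := by
  induction ks generalizing d with
  | nil => simp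
  | cons k ks ih =>
      simp only [List.nodup_cons] at hks
      have hd' : ((pvUpd d k (g k)).map Prod.fst).Nodup := by rw [keys_pvUpd]; exact hd
      rw [List.foldl_cons, ih _ hks.2 hd', pvUpd_eq_map d k (g k) hd, List.map_map]
      apply List.map_congr_left
      intro p _
      by_cases h : p.1 = k
      · have hk : k ∉ ks := hks.1
        simp [h, hk]
      · by_cases h2 : p.1 ∈ ks <;> simp [h, h2]

-- phase 1 of A: initialising every (distinct, fresh) key with []
theorem init_loop_eq (hs : List String) (d : List (String × List String))
    (hfresh : ∀ h ∈ hs, h ∉ d.map Prod.fst) (hn : hs.Nodup) :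
    hs.foldl (fun d h => pvSetEmpty d h) d = d ++ hs.map (fun h => (h, [])) := by
  induction hs generalizing d with
  | nil => simp
  | cons h hs ih =>
      simp only [List.nodup_cons] at hn
      have hset : pvSetEmpty d h = d ++ [(h, [])] := by
        have hh := hfresh h (by simp)
        clear hfresh
        induction d with
        | nil => rfl
        | cons p rest ihd =>
            simp only [List.map_cons, List.mem_cons] at hh
            push_neg at hh
            simp [pvSetEmpty, Ne.symm hh.1, ihd hh.2]
      rw [List.foldl_cons, hset, ih (d ++ [(h, [])])]
      · simp
      · intro h' hh'
        simp only [List.map_append, List.mem_append, List.map_cons, List.map_nil, List.mem_singleton]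
        push_neg
        exact ⟨hfresh h' (by simp [hh']), fun e => hn.1 (e ▸ hh')⟩
      · exact hn.2

-- A's result on nodup headers: each header mapped to all other headers, in order
theorem portA_char (headers : List String) (hn : headers.Nodup) :
    (headers.foldl (fun d subject =>
        headers.foldl (fun d sub => if sub ≠ subject then pvAppendAt d subject sub else d) d)
      (headers.foldl (fun d h => pvSetEmpty d h) []))
      = headers.map (fun h => (h, headers.filter (fun s => decide (s ≠ h)))) := by
  have h0 : headers.foldl (fun d h => pvSetEmpty d h) [] = headers.map (fun h => (h, ([] : List String))) := by
    simpa using init_loop_eq headers [] (by simp) hn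
  have hstep : (fun d subject =>
      headers.foldl (fun d sub => if sub ≠ subject then pvAppendAt d subject sub else d) d)
      = fun d s => pvUpd d s (fun v => v ++ headers.filter (fun x => decide (x ≠ s))) := by
    funext d s
    exact inner_loop_eq headers s d
  rw [h0, hstep, outer_loop_eq headers _ _ hn (by simpa [List.map_map, Function.comp_def] using hn), List.map_map]
  apply List.map_congr_left
  intro h hh
  simp [hh]

-- filtering out the i-th element of a nodup list = removing it by position
theorem filter_ne_getElem (l : List String) (hn : l.Nodup) (i : Nat) (hi : i < l.length) :
    l.filter (fun s => decide (s ≠ l[i])) = l.take i ++ l.drop (i + 1) := by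
  induction l generalizing i with
  | nil => simp at hi
  | cons a t ih =>
      simp only [List.nodup_cons] at hn
      cases i with
      | zero =>
          simp only [List.getElem_cons_zero, List.take_zero, List.drop_succ_cons, List.drop_zero,
            List.nil_append, List.filter_cons]
          rw [if_neg (by simp)]
          exact List.filter_eq_self.mpr (fun b hb => by
            simp only [decide_eq_true_eq, ne_eq]
            exact fun e => hn.1 (e ▸ hb))
      | succ j =>
          have hj : j < t.length := by simpa using hi
          have hne : a ≠ t[j] := fun e => hn.1 (e ▸ List.getElem_mem hj)
          simp only [List.getElem_cons_succ, List.take_succ_cons, List.drop_succ_cons,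
            List.cons_append, List.filter_cons]
          rw [if_pos (by simpa using hne)]
          exact congrArg (List.cons a) (ih hn.2 j hj)

-- B's result on nodup headers: the same map
theorem portB_char (headers : List String) (hn : headers.Nodup) :
    (PySem.List.enumerate headers).map
      (fun p => (p.2, PySem.List.slice headers none (some p.1) ++ PySem.List.slice headers (some (p.1 + 1)) none))
      = headers.map (fun h => (h, headers.filter (fun s => decide (s ≠ h)))) := by
  apply List.ext_getElem
  · simp [PySem.List.length_enumerate]
  · intro i h1 h2
    have hi : i < headers.length := by simpa [PySem.List.length_enumerate] using h1
    simp only [List.getElem_map, PySem.List.getElem_enumerate]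
    have e1 : PySem.List.slice headers none (some ((0 : Int) + (i : Nat))) = headers.take i := by
      rw [zero_add, PySem.List.slice_to_natCast]
    have e2 : PySem.List.slice headers (some ((0 : Int) + (i : Nat) + 1)) none = headers.drop (i + 1) := by
      rw [zero_add]
      have : ((i : Nat) : Int) + 1 = ((i + 1 : Nat) : Int) := by push_cast; ring
      rw [this, PySem.List.slice_from_natCast]
    simp only [e1, e2, filter_ne_getElem headers hn i hi]

-- ===== VERDICT (by name: the statement is the Claim_ definition above) =====
theorem ft_generating_all_pair_subjects_spec : Claim_equal_ft_generating_all_pair_subjects := by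
  intro data _ hpre
  unfold Spec_ft_generating_all_pair_subjects ft_generating_all_pair_subjects ft_generating_all_pair_subjects_alt
  rw [portA_char _ hpre, portB_char _ hpre]
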